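-- pv_equiv track=rewrite | github.com/avirooppal/resume-matcher | resume_analyzer/utils.py | find_section_indices
-- ===== SOURCE A (Python) =====
-- def find_section_indices(lines, keywords):
--     """Finds start and end line indices for a section based on keywords."""
--     start_index = -1
--     end_index = len(lines)
--     found_start = False
--
--     for i, line in enumerate(lines):
--         line_stripped = line.strip()
--         if not line_stripped: # Skip empty lines for header detection
--             continue
--
--         line_lower = line_stripped.lower()
--
--         # Check if the current line matches any keyword
--         is_keyword_match = any(keyword.lower() in line_lower for keyword in keywords)
--
--         if not found_start and is_keyword_match:
--             # Found the start of the target section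
--             start_index = i
--             found_start = True
--         elif found_start and is_keyword_match:
--             # Found the start of the *next* section with the *same* keywords (e.g., multiple project sections)
--             # Treat this as the end of the previous section
--             end_index = i
--             break
--         elif found_start and not is_keyword_match:
--             # Check if this line looks like a header for *any* common section
--             # Simple heuristic: ALL CAPS or Title Case and relatively short
--             # This helps find the end boundary when the next section has different keywords
--             is_potential_header = (line_stripped.isupper() and len(line_stripped.split()) < 6) or \
--                                   (line_stripped.istitle() and len(line_stripped.split()) < 6)
--             # Avoid matching very short lines that aren't headers
--             if is_potential_header and len(line_stripped) > 4:
--                 # Found the start of a different section, so end the current one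
--                 end_index = i
--                 break
--
--     return start_index, end_index
-- ===== SOURCE B (Python) =====
-- def find_section_indices(lines, keywords):
--     """Build an index table of boundary lines (keyword matches and headers) in one
--     classification pass, then derive start and end arithmetically: start is the first
--     match index, end the minimum boundary index after it."""
--     kws = [k.lower() for k in keywords]
--     marks = []  # (index, is_keyword_match) for every boundary line
--     for i, line in enumerate(lines):
--         s = line.strip()
--         if not s:
--             continue
--         m = any(k in s.lower() for k in kws)
--         h = (s.isupper() or s.istitle()) and len(s.split()) < 6 and len(s) > 4
--         if m or h:
--             marks.append((i, m))
--     starts = [i for i, m in marks if m]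
--     if not starts:
--         return -1, len(lines)
--     start = starts[0]
--     end = min((i for i, _ in marks if i > start), default=len(lines))
--     return start, end
-- ===== Notes on version B (the rewrite author's own statement) =====
-- stated objective: alternative
-- what changed: Replaced A's stateful scan-with-break (found_start flag, early exit) by a table-building pass that classifies every line into boundary marks (index, is_keyword_match), then derives start as the first match index and end as the minimum boundary index greater than start, defaulting to len(lines).
import Mathlib
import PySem

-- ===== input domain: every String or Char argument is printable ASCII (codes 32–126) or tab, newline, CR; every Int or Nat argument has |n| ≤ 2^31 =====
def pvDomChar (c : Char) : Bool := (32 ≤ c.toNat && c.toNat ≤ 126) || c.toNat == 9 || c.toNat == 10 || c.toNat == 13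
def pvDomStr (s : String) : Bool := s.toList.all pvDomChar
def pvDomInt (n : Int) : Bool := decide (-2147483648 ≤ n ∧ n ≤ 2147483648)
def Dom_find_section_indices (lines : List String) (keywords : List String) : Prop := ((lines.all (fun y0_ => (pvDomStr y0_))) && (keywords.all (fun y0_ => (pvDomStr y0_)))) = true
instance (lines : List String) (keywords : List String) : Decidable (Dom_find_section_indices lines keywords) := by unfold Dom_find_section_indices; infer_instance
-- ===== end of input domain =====

-- B replaces A's stateful scan-with-break by a classification pass that tabulates every
-- boundary line (keyword match or header), deriving start/end as first-match and
-- min-after-start over that table; objective: alternative algorithm, same cost.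

-- Hand ports of the Python str builtins `isupper`/`istitle` (not in PySem); exact on the
-- ASCII domain, where cased characters are exactly the letters.
-- s.isupper(): at least one cased character and no lowercase character.
def pyIsupper (s : String) : Bool :=
  s.toList.any (fun c => PySem.Chars.isalpha c) && s.toList.all (fun c => !PySem.Chars.islower c)

-- s.istitle(): uppercase only after an uncased char, lowercase only after a cased char,
-- and at least one cased character (`seen`).
def istitleAux : List Char → Bool → Bool → Bool
  | [], _, seen => seen
  | c :: rest, prevCased, seen =>
    if PySem.Chars.isupper c then (!prevCased) && istitleAux rest true true
    else if PySem.Chars.islower c then prevCased && istitleAux rest true true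
    else istitleAux rest false seen

def pyIstitle (s : String) : Bool := istitleAux s.toList false false

-- ===== PORT A =====
-- A's single for-loop over enumerate(lines) with state (start_index, end_index, found_start);
-- `break` becomes returning the pair directly.
def loopA (kws : List String) : List String → Nat → Int → Int → Bool → Int × Int
  | [], _, s, e, _ => (s, e)
  | l :: rest, i, s, e, f =>
    let ls := PySem.Str.strip l
    if ls == "" then loopA kws rest (i + 1) s e f
    else
      let km := kws.any (fun k => PySem.Str.isIn (PySem.Str.lower k) (PySem.Str.lower ls))
      if !f && km then loopA kws rest (i + 1) (↑i) e true
      else if f && km then (s, (↑i : Int))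
      else if f && !km then
        let hdr := (pyIsupper ls && decide ((PySem.Str.split₀ ls).length < 6)) ||
                   (pyIstitle ls && decide ((PySem.Str.split₀ ls).length < 6))
        if hdr && decide (4 < PySem.Str.len ls) then (s, (↑i : Int))
        else loopA kws rest (i + 1) s e f
      else loopA kws rest (i + 1) s e f

def find_section_indices (lines : List String) (keywords : List String) : Int × Int :=
  loopA keywords lines 0 (-1) (↑lines.length) false

-- ===== PORT B =====
-- `any(k in s.lower() for k in kws)` over the pre-lowered keyword list
def matchesKwB (kws : List String) (s : String) : Bool :=
  kws.any (fun k => PySem.Str.isIn k (PySem.Str.lower s))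

def isHeaderB (s : String) : Bool :=
  (pyIsupper s || pyIstitle s) &&
    decide ((PySem.Str.split₀ s).length < 6) && decide (4 < PySem.Str.len s)

-- the classification pass: (index, is_keyword_match) for every boundary line
def marksB (kws : List String) : List String → Nat → List (Nat × Bool)
  | [], _ => []
  | l :: rest, i =>
    let s := PySem.Str.strip l
    if s == "" then marksB kws rest (i + 1)
    else
      let m := matchesKwB kws s
      let h := isHeaderB s
      if m || h then (i, m) :: marksB kws rest (i + 1) else marksB kws rest (i + 1)

def find_section_indices_alt (lines : List String) (keywords : List String) : Int × Int :=
  let kws := keywords.map PySem.Str.lower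
  let marks := marksB kws lines 0
  let starts := (marks.filter (fun p => p.2)).map (fun p => p.1)
  match starts with
  | [] => (-1, (↑lines.length : Int))
  | start :: _ =>
    let ends := (marks.map Prod.fst).filter (fun j => decide (start < j))
    let e : Int := match PySem.List.min? ends (fun x => x) with
      | none => (↑lines.length : Int)
      | some v => (↑v : Int)
    ((↑start : Int), e)

-- ===== PRECONDITION & SPEC =====
def Spec_find_section_indices (lines : List String) (keywords : List String) (out : Int × Int) : Prop := out = find_section_indices_alt lines keywords
instance (lines : List String) (keywords : List String) (out : Int × Int) : Decidable (Spec_find_section_indices lines keywords out) := by unfold Spec_find_section_indices; infer_instance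

-- ===== CLAIM (what is proved, stated in full; the proofs are below) =====
def Claim_equal_find_section_indices : Prop := ∀ (lines : List String) (keywords : List String), Dom_find_section_indices lines keywords → Spec_find_section_indices lines keywords (find_section_indices lines keywords)

-- ===== LEMMAS AND PROOFS =====

-- B's match test over pre-lowered keywords is A's per-iteration lowering.
theorem matchesKwB_map (kws : List String) (s : String) :
    matchesKwB (kws.map PySem.Str.lower) s =
      kws.any (fun k => PySem.Str.isIn (PySem.Str.lower k) (PySem.Str.lower s)) := by
  simp [matchesKwB, List.any_map, Function.comp_def]

-- Bool algebra behind the header test: A's ((up && w) || (ti && w)) && long = B's (up || ti) && w && long.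
theorem hdrA_eq (ls : String) :
    (((pyIsupper ls && decide ((PySem.Str.split₀ ls).length < 6)) ||
      (pyIstitle ls && decide ((PySem.Str.split₀ ls).length < 6))) &&
      decide (4 < PySem.Str.len ls)) = isHeaderB ls := by
  unfold isHeaderB
  cases pyIsupper ls <;> cases pyIstitle ls <;>
    cases decide ((PySem.Str.split₀ ls).length < 6) <;>
    cases decide (4 < PySem.Str.len ls) <;> rfl

-- every index recorded by marksB from position i on is ≥ i
theorem marksB_ge (kws : List String) (rest : List String) :
    ∀ (i : Nat) (p : Nat × Bool), p ∈ marksB kws rest i → i ≤ p.1 := by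
  induction rest with
  | nil => intro i p h; simp [marksB] at h
  | cons l rest ih =>
    intro i p h
    simp only [marksB] at h
    split at h
    · have := ih (i + 1) p h; omega
    · split at h
      · rcases List.mem_cons.mp h with rfl | h
        · simp
        · have := ih (i + 1) p h; omega
      · have := ih (i + 1) p h; omega

-- min of the (increasing) index column of marksB is its head
theorem min?_marksB (kws : List String) (rest : List String) :
    ∀ (i : Nat), PySem.List.min? ((marksB kws rest i).map Prod.fst) (fun x => x) =
      ((marksB kws rest i).map Prod.fst).head? := by
  induction rest with
  | nil => intro i; simp [marksB, PySem.List.min?]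
  | cons l rest ih =>
    intro i
    simp only [marksB]
    split
    · exact ih (i + 1)
    · split
      · simp only [List.map_cons, List.head?_cons]
        rw [PySem.List.min?_id_cons]
        have hfold : ((marksB kws rest (i + 1)).map Prod.fst).foldl min i = i := by
          have h1 := PySem.List.foldl_min_le ((marksB kws rest (i + 1)).map Prod.fst) i
          rcases PySem.List.foldl_min_mem ((marksB kws rest (i + 1)).map Prod.fst) i with h | h
          · exact h
          · rcases List.mem_map.mp h with ⟨p, hp, hpe⟩
            have := marksB_ge kws rest (i + 1) p hp
            omega
        rw [hfold]
      · exact ih (i + 1)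

-- Once found_start is true, A's remaining loop returns the first boundary index of marksB.
theorem loopA_found (keywords : List String) (rest : List String) :
    ∀ (i : Nat) (s e : Int), loopA keywords rest i s e true =
      (s, match marksB (keywords.map PySem.Str.lower) rest i with
          | [] => e
          | (k, _) :: _ => (↑k : Int)) := by
  induction rest with
  | nil => intro i s e; simp [loopA, marksB]
  | cons l rest ih =>
    intro i s e
    simp only [loopA, marksB, matchesKwB_map, hdrA_eq]
    cases hls : (PySem.Str.strip l == "") with
    | true => simp only [if_true]; exact ih (i + 1) s e
    | false =>
      simp only [Bool.false_eq_true, if_false]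
      cases hkm : (keywords.any fun k =>
          PySem.Str.isIn (PySem.Str.lower k) (PySem.Str.lower (PySem.Str.strip l))) with
      | true => simp
      | false =>
        simp only [Bool.not_true, Bool.and_false, Bool.and_true,
          Bool.false_eq_true, if_false, Bool.not_false, Bool.false_or]
        cases hh : isHeaderB (PySem.Str.strip l) with
        | true => simp
        | false => simp only [Bool.false_eq_true, if_false]; exact ih (i + 1) s e

-- A's searching phase equals B's table-derived formula, for any default e.
theorem loopA_marks (keywords : List String) (rest : List String) :
    ∀ (i : Nat) (e : Int), loopA keywords rest i (-1) e false =
      (match ((marksB (keywords.map PySem.Str.lower) rest i).filter (fun p => p.2)).map (fun p => p.1) with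
       | [] => ((-1 : Int), e)
       | start :: _ =>
         ((↑start : Int),
          match PySem.List.min? (((marksB (keywords.map PySem.Str.lower) rest i).map Prod.fst).filter
              (fun j => decide (start < j))) (fun x => x) with
          | none => e
          | some v => (↑v : Int))) := by
  induction rest with
  | nil => intro i e; simp [loopA, marksB]
  | cons l rest ih =>
    intro i e
    simp only [loopA, marksB, matchesKwB_map, hdrA_eq]
    cases hls : (PySem.Str.strip l == "") with
    | true => simp only [if_true]; exact ih (i + 1) e
    | false =>
      simp only [Bool.false_eq_true, if_false]
      cases hkm : (keywords.any fun k =>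
          PySem.Str.isIn (PySem.Str.lower k) (PySem.Str.lower (PySem.Str.strip l))) with
      | false =>
        -- no keyword match at this line: A keeps searching
        simp only [Bool.not_false, Bool.and_false, Bool.and_true,
          Bool.false_eq_true, if_false, Bool.false_or]
        cases hh : isHeaderB (PySem.Str.strip l) with
        | false => simp only [Bool.false_eq_true, if_false]; exact ih (i + 1) e
        | true =>
          -- header boundary (i, false): dropped by the match filter and by `start < i`
          simp only [if_true, List.filter_cons, Bool.false_eq_true, if_false]
          rw [ih (i + 1) e]
          cases hst : ((marksB (keywords.map PySem.Str.lower) rest (i + 1)).filter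
              (fun p => p.2)).map (fun p => p.1) with
          | nil => rfl
          | cons start tl =>
            have hstart : i + 1 ≤ start := by
              have hmem : start ∈ ((marksB (keywords.map PySem.Str.lower) rest (i + 1)).filter
                  (fun p => p.2)).map (fun p => p.1) := by rw [hst]; simp
              rcases List.mem_map.mp hmem with ⟨p, hp, hpe⟩
              have := marksB_ge (keywords.map PySem.Str.lower) rest (i + 1) p
                (List.mem_of_mem_filter hp)
              omega
            simp only [List.map_cons, List.filter_cons]
            have hni : ¬ start < i := by omega
            simp [hni]
      | true =>
        -- keyword match: A enters the found phase with start = i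
        simp only [Bool.not_false, Bool.true_and, Bool.true_or, if_true]
        rw [loopA_found]
        simp only [List.filter_cons, if_true, List.map_cons]
        have hni : ¬ i < i := by omega
        simp only [hni, decide_false, Bool.false_eq_true, if_false]
        have hfil : ((marksB (keywords.map PySem.Str.lower) rest (i + 1)).map Prod.fst).filter
            (fun j => decide (i < j)) = (marksB (keywords.map PySem.Str.lower) rest (i + 1)).map Prod.fst := by
          apply List.filter_eq_self.mpr
          intro j hj
          rcases List.mem_map.mp hj with ⟨p, hp, hpe⟩
          have := marksB_ge (keywords.map PySem.Str.lower) rest (i + 1) p hp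
          simp only [decide_eq_true_eq]
          omega
        rw [hfil, min?_marksB]
        cases marksB (keywords.map PySem.Str.lower) rest (i + 1) with
        | nil => rfl
        | cons p tl => cases p; rfl

-- ===== VERDICT (by name: the statement is the Claim_ definition above) =====
theorem find_section_indices_spec : Claim_equal_find_section_indices := by
  intro lines keywords _
  unfold Spec_find_section_indices find_section_indices find_section_indices_alt
  rw [loopA_marks]
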